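-- pv_equiv track=rewrite | github.com/3rr4t1c/knowledge-graph-augmentation | main/ComplEx/proof_Lector.py | create_row_index
-- ===== SOURCE A (Python) =====
-- def create_row_index(seq):
--     index = dict()
--     row = 0
--     for x in seq:
--         if x not in index:
--             index[x] = row
--             row += 1
--
--     return index
-- ===== SOURCE B (Python) =====
-- def create_row_index(seq):
--     # Record each element's first-occurrence position by scanning BACKWARDS
--     # (later, i.e. earlier-position, writes win), then sort the distinct
--     # elements by that position and rank them.
--     first = {}
--     for i, x in reversed(list(enumerate(seq))):
--         first[x] = i
--     order = sorted(first, key=first.get)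
--     return {x: r for r, x in enumerate(order)}
-- ===== Notes on version B (the rewrite author's own statement) =====
-- stated objective: alternative
-- what changed: Replaces A's single forward pass with a membership test and running counter by a sort-based algorithm: a backward pass records each element's first-occurrence position by overwriting, then the distinct elements are sorted by that position and ranked by enumeration.
import Mathlib
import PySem

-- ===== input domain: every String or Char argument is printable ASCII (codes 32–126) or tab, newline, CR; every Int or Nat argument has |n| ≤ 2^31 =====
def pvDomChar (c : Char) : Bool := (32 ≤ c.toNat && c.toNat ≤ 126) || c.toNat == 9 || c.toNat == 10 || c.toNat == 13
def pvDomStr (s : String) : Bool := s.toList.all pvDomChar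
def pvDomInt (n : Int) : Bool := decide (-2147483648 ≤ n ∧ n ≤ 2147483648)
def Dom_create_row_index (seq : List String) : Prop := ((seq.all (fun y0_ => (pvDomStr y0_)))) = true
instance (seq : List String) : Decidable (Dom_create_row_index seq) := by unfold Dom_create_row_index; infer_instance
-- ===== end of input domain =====

-- B replaces A's single forward pass (membership test + running counter) by a sort-based
-- algorithm: a backward pass records first-occurrence positions, then the distinct
-- elements are sorted by that position and ranked; objective: alternative.

-- ===== PORT A =====
-- one pass: dict + row counter, insert new keys with the current row
def create_row_index (seq : List String) : List (String × Int) :=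
  (seq.foldl
    (fun (st : PySem.Dict String Int × Int) x =>
      if st.1.contains x then st else (st.1.insert x st.2, st.2 + 1))
    (PySem.Dict.empty, 0)).1.items

-- ===== PORT B =====
-- backward pass: first[x] = i for i, x in reversed(list(enumerate(seq)));
-- then order = sorted(first, key=first.get); then {x: r for r, x in enumerate(order)}
def create_row_index_alt (seq : List String) : List (String × Int) :=
  let first := ((PySem.List.enumerate seq 0).reverse).foldl
      (fun (d : PySem.Dict String Int) p => d.insert p.2 p.1) PySem.Dict.empty
  let order := PySem.List.sorted first.keys (fun x => first.getD x 0) false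
  (PySem.List.enumerate order 0).map (fun p => (p.2, p.1))

-- ===== PRECONDITION & SPEC =====
def Spec_create_row_index (seq : List String) (out : List (String × Int)) : Prop := out = create_row_index_alt seq
instance (seq : List String) (out : List (String × Int)) : Decidable (Spec_create_row_index seq out) := by unfold Spec_create_row_index; infer_instance

-- ===== CLAIM (what is proved, stated in full; the proofs are below) =====
def Claim_equal_create_row_index : Prop := ∀ (seq : List String), Dom_create_row_index seq → Spec_create_row_index seq (create_row_index seq)

-- ===== LEMMAS AND PROOFS =====

-- A-side loop invariant: starting from the dict whose items are the swapped enumeration of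
-- the distinct elements s seen so far (row = s.length), A's fold produces the swapped
-- enumeration of the Set.add-fold (Python's ordered dedup) of the remaining input.
lemma create_row_index_inv (l : List String) : ∀ (s : List String),
    (l.foldl
      (fun (st : PySem.Dict String Int × Int) x =>
        if st.1.contains x then st else (st.1.insert x st.2, st.2 + 1))
      (PySem.Dict.mk ((PySem.List.enumerate s 0).map (fun p => (p.2, p.1))), (s.length : Int))).1.items
    = (PySem.List.enumerate (l.foldl PySem.Set.add s) 0).map (fun p => (p.2, p.1)) := by
  induction l with
  | nil => intro s; rfl
  | cons x l ih =>
    intro s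
    have hc : (PySem.Dict.mk ((PySem.List.enumerate s 0).map (fun p => (p.2, p.1)))).contains x
        = decide (x ∈ s) := by
      rw [PySem.Dict.contains_mk, List.any_map]
      rw [show ((fun (p : String × Int) => p.1 == x) ∘ (fun (p : Int × String) => (p.2, p.1)))
            = ((· == x) ∘ (fun (p : Int × String) => p.2)) from rfl]
      rw [← List.any_map, PySem.List.map_snd_enumerate]
      induction s with
      | nil => simp
      | cons a t ihs =>
        simp only [List.any_cons, List.mem_cons]
        by_cases h : x = a
        · subst h; simp
        · have h2 : (a == x) = false := by simp [Ne.symm h]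
          simp [h, h2, ihs]
    by_cases hx : x ∈ s
    · have hadd : PySem.Set.add s x = s := by simp [PySem.Set.add, hx]
      simp [List.foldl_cons, hc, hx, ih]
    · have hins : (PySem.Dict.mk ((PySem.List.enumerate s 0).map (fun p => (p.2, p.1)))).insert x (s.length : Int)
          = PySem.Dict.mk ((PySem.List.enumerate (s ++ [x]) 0).map (fun p => (p.2, p.1))) := by
        simp [PySem.Dict.insert, hc, hx, PySem.List.enumerate_append]
      have hadd : PySem.Set.add s x = s ++ [x] := by simp [PySem.Set.add, hx]
      have hlen : ((s ++ [x]).length : Int) = (s.length : Int) + 1 := by simp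
      simp only [List.foldl_cons, hc, hx, decide_false, Bool.false_eq_true, if_false, hins, hadd,
        ← hlen, ih]

-- B-side: a fold of overwriting inserts looks up as find? on the reversed pair list
lemma get?_foldl_insert_pairs (ps : List (Int × String)) (d : PySem.Dict String Int) (x : String) :
    (ps.foldl (fun d p => d.insert p.2 p.1) d).get? x
      = ((ps.reverse.find? (fun p => p.2 == x)).map (·.1)).or (d.get? x) := by
  induction ps generalizing d with
  | nil => simp
  | cons p ps ih =>
    rw [List.foldl_cons, ih, List.reverse_cons, List.find?_append]
    by_cases h : p.2 = x
    · subst h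
      simp [PySem.Dict.get?_insert_self]
    · have hne : x ≠ p.2 := Ne.symm h
      simp [PySem.Dict.get?_insert_of_ne _ _ hne, h]

-- find? over an enumeration finds the first index of x, shifted by the start
lemma find?_enumerate_eq (seq : List String) (x : String) (h : x ∈ seq) : ∀ (s : Int),
    (PySem.List.enumerate seq s).find? (fun p => p.2 == x)
      = some (s + (seq.idxOf x : Int), x) := by
  induction seq with
  | nil => cases h
  | cons a t ih =>
    intro s
    rw [PySem.List.enumerate_cons]
    by_cases hax : a = x
    · subst hax
      simp [List.idxOf_cons_self]
    · have hxt : x ∈ t := by cases h with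
        | head => exact absurd rfl hax
        | tail _ ht => exact ht
      have hb : ((fun (p : Int × String) => p.2 == x) (s, a)) = false := by simp [hax]
      rw [List.find?_cons_of_neg (by simp [hax]), ih hxt (s + 1)]
      have : (( (a :: t).idxOf x : Nat) : Int) = (t.idxOf x : Int) + 1 := by
        rw [List.idxOf_cons_ne _ (by simpa using hax)]
        push_cast; ring
      rw [this]
      congr 1
      ring_nf

-- the distinct elements in first-occurrence order are strictly increasing under idxOf
lemma pairwise_idxOf_ofList (seq : List String) :
    (PySem.Set.ofList seq).Pairwise (fun a b => seq.idxOf a < seq.idxOf b) := by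
  induction seq using List.reverseRecOn with
  | nil => simp [PySem.Set.ofList]
  | append_singleton xs x ih =>
    rw [PySem.Set.ofList_append_singleton]
    have hmem : ∀ a ∈ PySem.Set.ofList xs, a ∈ xs := fun a ha => (PySem.Set.mem_ofList _ _).1 ha
    have hidx : ∀ a ∈ PySem.Set.ofList xs, (xs ++ [x]).idxOf a = xs.idxOf a := by
      intro a ha; exact List.idxOf_append_of_mem (hmem a ha)
    by_cases hx : x ∈ xs
    · rw [PySem.Set.add_of_mem ((PySem.Set.mem_ofList _ _).2 hx)]
      refine List.Pairwise.imp_of_mem ?_ ih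
      intro a b ha hb hab
      rw [hidx a ha, hidx b hb]; exact hab
    · rw [PySem.Set.add_of_not_mem (fun h => hx ((PySem.Set.mem_ofList _ _).1 h))]
      rw [List.pairwise_append]
      refine ⟨?_, by simp, ?_⟩
      · refine List.Pairwise.imp_of_mem ?_ ih
        intro a b ha hb hab
        rw [hidx a ha, hidx b hb]; exact hab
      · intro a ha b hb
        rw [List.mem_singleton] at hb
        rw [hb]
        have h1 : (xs ++ [x]).idxOf a = xs.idxOf a := hidx a ha
        have h2 : (xs ++ [x]).idxOf x = xs.length := by
          rw [List.idxOf_append_of_notMem hx]; simp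
        rw [h1, h2]
        exact List.idxOf_lt_length_of_mem (hmem a ha)

-- ===== VERDICT (by name: the statement is the Claim_ definition above) =====
theorem create_row_index_spec : Claim_equal_create_row_index := by
  intro seq _
  show create_row_index seq = create_row_index_alt seq
  -- A's side: swapped enumeration of the ordered distinct elements
  have hA : create_row_index seq
      = (PySem.List.enumerate (PySem.Set.ofList seq) 0).map (fun p => (p.2, p.1)) := by
    have h := create_row_index_inv seq []
    simpa [create_row_index, PySem.Dict.empty, PySem.List.enumerate, PySem.Set.ofList] using h
  -- B's dict
  set d := ((PySem.List.enumerate seq 0).reverse).foldl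
      (fun (d : PySem.Dict String Int) p => d.insert p.2 p.1) PySem.Dict.empty with hd
  -- lookup in d is the first-occurrence index
  have hget : ∀ x ∈ seq, d.get? x = some ((seq.idxOf x : Nat) : Int) := by
    intro x hx
    rw [hd, get?_foldl_insert_pairs, List.reverse_reverse, find?_enumerate_eq seq x hx 0]
    simp
  have hgetD : ∀ x ∈ seq, d.getD x 0 = ((seq.idxOf x : Nat) : Int) := by
    intro x hx
    rw [PySem.Dict.getD_eq_get?_getD, hget x hx]; rfl
  -- keys of d are exactly the elements of seq (no duplicates)
  have hkeys : d.keys = PySem.Set.ofList ((PySem.List.enumerate seq 0).reverse.map (·.2)) := by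
    rw [hd, PySem.Dict.keys_foldl_insert_key]
    simp [PySem.Dict.keys_empty, PySem.Set.update_nil_left]
  have hmemkeys : ∀ x, x ∈ d.keys ↔ x ∈ seq := by
    intro x
    rw [hkeys, PySem.Set.mem_ofList, List.mem_map]
    constructor
    · rintro ⟨p, hp, rfl⟩
      rw [List.mem_reverse] at hp
      have := (PySem.List.mem_enumerate_iff _ _ _).1 hp
      obtain ⟨k, hk, rfl⟩ := this
      exact List.getElem_mem hk
    · intro hx
      have : x ∈ (PySem.List.enumerate seq 0).map (·.2) := by
        rw [PySem.List.map_snd_enumerate]; exact hx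
      obtain ⟨p, hp, hpx⟩ := List.mem_map.1 this
      exact ⟨p, List.mem_reverse.2 hp, hpx⟩
  have hnodup : d.keys.Nodup := by
    rw [hd]
    exact PySem.Dict.nodup_keys_foldl_insert_key _ _ _ _ PySem.Dict.nodup_keys_empty
  -- the sorted order is exactly the first-occurrence dedup
  have hperm : (PySem.Set.ofList seq).Perm d.keys := by
    rw [List.perm_ext_iff_of_nodup (PySem.Set.nodup_ofList _) hnodup]
    intro a
    rw [PySem.Set.mem_ofList]
    rw [hmemkeys]
  have hpw : (PySem.Set.ofList seq).Pairwise
      (fun a b => d.getD a 0 < d.getD b 0) := by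
    refine List.Pairwise.imp_of_mem ?_ (pairwise_idxOf_ofList seq)
    intro a b ha hb hab
    rw [hgetD a ((PySem.Set.mem_ofList _ _).1 ha), hgetD b ((PySem.Set.mem_ofList _ _).1 hb)]
    exact_mod_cast hab
  have hsorted : PySem.List.sorted d.keys (fun x => d.getD x 0) false = PySem.Set.ofList seq :=
    PySem.List.sorted_eq_of_perm_of_pairwise_lt _ _ _ hperm hpw
  rw [hA]
  show _ = (PySem.List.enumerate (PySem.List.sorted d.keys (fun x => d.getD x 0) false) 0).map
      (fun p => (p.2, p.1))
  rw [hsorted]
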